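-- pv_equiv track=rewrite | github.com/noushadkhalid/codeteki-react.js-django | backend/core/services/blog_content_generator.py | _remove_duplicate_titles
-- ===== SOURCE A (Python) =====
-- def _remove_duplicate_titles(md: str) -> str:
--     """Remove duplicate H1 headings that gpt-4o-mini sometimes outputs."""
--     lines = md.splitlines()
--     out = []
--     seen_h1 = False
--     last_title = None
--
--     for line in lines:
--         if line.startswith("# "):
--             title = line[2:].strip().lower()
--             if last_title == title:
--                 continue
--             last_title = title
--             if seen_h1:
--                 continue
--             seen_h1 = True
--         out.append(line)
--     return "\n".join(out).strip()
-- ===== SOURCE B (Python) =====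
-- def _remove_duplicate_titles(md: str) -> str:
--     """Remove duplicate H1 headings that gpt-4o-mini sometimes outputs."""
--     lines = md.splitlines()
--     first_h1 = next((i for i, l in enumerate(lines) if l.startswith("# ")), None)
--     kept = [l for i, l in enumerate(lines)
--             if not l.startswith("# ") or i == first_h1]
--     return "\n".join(kept).strip()
-- ===== Notes on version B (the rewrite author's own statement) =====
-- stated objective: simpler
-- what changed: Replaces the stateful seen_h1/last_title state machine with a stateless precompute-then-filter: find the index of the first H1 line, then keep every non-heading line plus only that one heading in a single comprehension.
import Mathlib
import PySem

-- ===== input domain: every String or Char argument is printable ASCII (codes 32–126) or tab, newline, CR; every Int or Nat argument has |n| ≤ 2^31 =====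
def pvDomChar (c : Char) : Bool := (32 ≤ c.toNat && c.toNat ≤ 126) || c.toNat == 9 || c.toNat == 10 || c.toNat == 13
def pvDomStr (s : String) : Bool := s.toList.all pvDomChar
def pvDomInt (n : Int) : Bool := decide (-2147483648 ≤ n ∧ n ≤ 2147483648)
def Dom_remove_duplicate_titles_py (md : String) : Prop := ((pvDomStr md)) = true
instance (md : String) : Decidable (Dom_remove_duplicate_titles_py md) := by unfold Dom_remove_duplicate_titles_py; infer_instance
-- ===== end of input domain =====

-- B replaces A's stateful seen_h1/last_title pass with a stateless precompute-then-filter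
-- (index of the first H1, then one comprehension keeping non-headings plus that heading): simpler.


-- ===== PORT A =====
-- A-side helper: the body of A's for-loop, one step of the (out, seen_h1, last_title) state machine
def pvStepA (acc : List String × Bool × Option String) (line : String) :
    List String × Bool × Option String :=
  if PySem.Str.startswith line "# " then
    let title := PySem.Str.lower (PySem.Str.strip (PySem.Str.slice line (some 2) none))
    if acc.2.2 == some title then acc
    else if acc.2.1 then (acc.1, acc.2.1, some title)
    else (acc.1 ++ [line], true, some title)
  else (acc.1 ++ [line], acc.2.1, acc.2.2)

def remove_duplicate_titles_py (md : String) : String :=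
  let lines := PySem.Str.splitlines md
  let acc := lines.foldl pvStepA ([], false, none)
  PySem.Str.strip (PySem.Str.join "\n" acc.1)

-- ===== PORT B =====
def remove_duplicate_titles_py_alt (md : String) : String :=
  let lines := PySem.Str.splitlines md
  let enum := PySem.List.enumerate lines
  let first_h1 : Option Int := (enum.find? (fun p => PySem.Str.startswith p.2 "# ")).map (·.1)
  let kept := (enum.filter (fun p => !PySem.Str.startswith p.2 "# " || first_h1 == some p.1)).map (·.2)
  PySem.Str.strip (PySem.Str.join "\n" kept)

-- ===== PRECONDITION & SPEC =====
def Spec_remove_duplicate_titles_py (md : String) (out : String) : Prop := out = remove_duplicate_titles_py_alt md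
instance (md : String) (out : String) : Decidable (Spec_remove_duplicate_titles_py md out) := by unfold Spec_remove_duplicate_titles_py; infer_instance

-- ===== CLAIM (what is proved, stated in full; the proofs are below) =====
def Claim_equal_remove_duplicate_titles_py : Prop := ∀ (md : String), Dom_remove_duplicate_titles_py md → Spec_remove_duplicate_titles_py md (remove_duplicate_titles_py md)

-- ===== LEMMAS AND PROOFS =====
-- "is an H1 heading line"
def pvH (l : String) : Bool := PySem.Str.startswith l "# "

-- the intended kept-lines: everything up to and including the first H1, then the non-headings
def pvSpecL : List String → List String
  | [] => []
  | l :: ls => if pvH l then l :: ls.filter (fun x => !pvH x) else l :: pvSpecL ls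

theorem foldA_seen (ls : List String) : ∀ (out : List String) (t : Option String),
    (ls.foldl pvStepA (out, true, t)).1 = out ++ ls.filter (fun x => !pvH x) := by
  induction ls with
  | nil => intro out t; simp
  | cons l ls ih =>
    intro out t
    by_cases h : pvH l = true
    · simp only [List.foldl_cons, pvStepA, pvH] at *
      rw [if_pos h]
      simp only [h, Bool.not_true, List.filter_cons, Bool.false_eq_true, if_false]
      split
      · exact ih out t
      · exact ih out _
    · simp only [List.foldl_cons, pvStepA, pvH] at *
      rw [if_neg h]
      simp only [h, Bool.not_false, List.filter_cons, if_pos]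
      rw [ih (out ++ [l]) t, List.append_assoc]
      rfl

theorem foldA_unseen (ls : List String) : ∀ (out : List String),
    (ls.foldl pvStepA (out, false, none)).1 = out ++ pvSpecL ls := by
  induction ls with
  | nil => intro out; simp [pvSpecL]
  | cons l ls ih =>
    intro out
    by_cases h : pvH l = true
    · simp only [List.foldl_cons, pvStepA, pvH] at *
      rw [if_pos h]
      simp only [Option.none_beq_some, Bool.false_eq_true, if_false]
      have h' : pvH l = true := h
      rw [foldA_seen]
      simp only [pvSpecL, h', if_true]
      simp
    · simp only [List.foldl_cons, pvStepA, pvH] at *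
      rw [if_neg h]
      have h' : pvH l = false := eq_false_of_ne_true h
      rw [ih (out ++ [l])]
      simp only [pvSpecL, h', Bool.false_eq_true, if_false]
      simp

theorem filter_enum_nonH (ls : List String) : ∀ (s : Int),
    ((PySem.List.enumerate ls s).filter (fun p => !pvH p.2)).map (·.2)
      = ls.filter (fun x => !pvH x) := by
  induction ls with
  | nil => intro s; simp [PySem.List.enumerate_nil]
  | cons l ls ih =>
    intro s
    rw [PySem.List.enumerate_cons]
    by_cases h : pvH l = true
    · simp only [List.filter_cons, h, Bool.not_true, Bool.false_eq_true, if_false]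
      exact ih (s + 1)
    · simp only [List.filter_cons, h, Bool.not_false, if_pos, List.map_cons]
      rw [ih (s + 1)]

theorem foldB (ls : List String) : ∀ (s : Int),
    ((PySem.List.enumerate ls s).filter
       (fun p => !pvH p.2 ||
          (((PySem.List.enumerate ls s).find? (fun q => pvH q.2)).map (·.1) == some p.1))).map (·.2)
      = pvSpecL ls := by
  induction ls with
  | nil => intro s; simp [PySem.List.enumerate_nil, pvSpecL]
  | cons l ls ih =>
    intro s
    rw [PySem.List.enumerate_cons]
    by_cases h : pvH l = true
    · rw [List.find?_cons_of_pos (by simpa using h)]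
      simp only [Option.map_some, pvSpecL, if_pos h]
      rw [List.filter_cons]
      simp only [h, Bool.not_true, Option.some_beq_some, beq_self_eq_true, Bool.false_or, if_pos]
      rw [List.map_cons]
      congr 1
      rw [← filter_enum_nonH ls (s + 1)]
      congr 1
      apply List.filter_congr
      intro p hp
      rw [PySem.List.mem_enumerate_iff] at hp
      obtain ⟨k, hk, rfl⟩ := hp
      have hne : ¬ (s = s + 1 + (k : Int)) := by omega
      simp [hne]
    · rw [List.find?_cons_of_neg (by simpa using h)]
      rw [List.filter_cons]
      have hmem : ∀ p ∈ PySem.List.enumerate ls (s + 1), p.1 ≠ s := by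
        intro p hp
        rw [PySem.List.mem_enumerate_iff] at hp
        obtain ⟨k, hk, rfl⟩ := hp
        simp only []
        omega
      by_cases hf : (((PySem.List.enumerate ls (s+1)).find? (fun q => pvH q.2)).map (·.1)) == some (s : Int)
      · -- the found index would have to be s, impossible: derive contradiction
        exfalso
        rw [beq_iff_eq] at hf
        obtain ⟨q, hq1, hq2⟩ := Option.map_eq_some_iff.mp hf
        have := List.mem_of_find?_eq_some hq1
        exact hmem q this hq2
      · simp only [h, Bool.not_false, Bool.true_or, if_pos, List.map_cons]
        rw [pvSpecL, if_neg h]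
        congr 1
        exact ih (s + 1)

-- ===== VERDICT (by name: the statement is the Claim_ definition above) =====
theorem remove_duplicate_titles_py_spec : Claim_equal_remove_duplicate_titles_py := by
  intro md _
  unfold Spec_remove_duplicate_titles_py remove_duplicate_titles_py remove_duplicate_titles_py_alt
  have hA := foldA_unseen (PySem.Str.splitlines md) []
  have hB := foldB (PySem.Str.splitlines md) 0
  simp only [pvH] at hB
  simp only []
  rw [hA, hB, List.nil_append]
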